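-- pv_equiv track=rewrite | github.com/Gabrri/Proyecto-Logica | LOGICA2_proyecto.py | formaClausal
-- ===== SOURCE A (Python) =====
-- def Clausula(C):
--
--     L = []
--     while len(C) > 0:
--         s = C[0]
--         if s == "O":
--             C = C[1:]
--         elif s == "-":
--             literal = s + C[1]
--             L.append(literal)
--             C = C[2:]
--         else:
--             L.append(s)
--             C = C[1:]
--
--     return L
--
-- def formaClausal(A):
--
--     L = []
--     count = 0
--     while len(A) > 0:
--         if count >= len(A):
--             L.append(Clausula(A))
--             A = []
--         else:
--             if A[count] is "Y":
--                 L.append(Clausula(A[:count]))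
--                 A = A[count+1:]
--                 count = 0
--             else:
--                 count += 1
--
--     return L
-- ===== SOURCE B (Python) =====
-- def formaClausal(A):
--     # One streaming pass: build the current clause as characters arrive,
--     # flushing it on every "Y"; no index scanning or repeated slicing.
--     clauses = []
--     cur = []
--     empty = True     # current segment has no characters yet
--     pending = False  # previous segment char was an unmatched '-'
--     for c in A:
--         if c == "Y":
--             clauses.append(cur)
--             cur = []
--             empty = True
--             pending = False
--         else:
--             empty = False
--             if pending:
--                 cur.append("-" + c)
--                 pending = False
--             elif c == "-":
--                 pending = True
--             elif c != "O":
--                 cur.append(c)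
--     if not empty:
--         clauses.append(cur)
--     return clauses
-- ===== Notes on version B (the rewrite author's own statement) =====
-- stated objective: faster
-- what changed: Replaced A's quadratic count-pointer scanning (repeated slicing of the remaining string plus a second per-clause tokenizer pass with more slicing) by a single streaming left-to-right pass that tokenizes while it reads and flushes the current clause at every 'Y'.
import Mathlib
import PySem

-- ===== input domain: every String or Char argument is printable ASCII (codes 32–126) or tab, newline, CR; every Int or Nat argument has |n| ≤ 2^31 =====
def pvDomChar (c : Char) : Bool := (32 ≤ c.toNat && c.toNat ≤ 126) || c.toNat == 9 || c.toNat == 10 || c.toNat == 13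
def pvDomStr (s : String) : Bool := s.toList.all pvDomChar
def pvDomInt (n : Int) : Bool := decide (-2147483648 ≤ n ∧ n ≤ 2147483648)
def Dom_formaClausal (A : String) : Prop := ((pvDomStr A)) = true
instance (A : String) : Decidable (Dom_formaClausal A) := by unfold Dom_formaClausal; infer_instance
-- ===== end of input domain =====

-- B replaces A's quadratic count-pointer scanning (repeated slicing plus a
-- second character-by-character tokenizer pass per clause) by ONE streaming
-- left-to-right pass that builds the current clause and flushes it on 'Y'.

-- ===== PORT A =====
-- the inner while-loop of Clausula; L is Python's accumulator list,
-- none = the IndexError of `C[1]` when C = "-" (a lone '-' at the end)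
def ClausulaA (C : List Char) (L : List String) : Option (List String) :=
  match C with
  | [] => some L
  | s :: rest =>
    if s = 'O' then ClausulaA rest L
    else if s = '-' then
      match rest with
      | [] => none                                   -- C[1] raises IndexError
      | t :: rest2 => ClausulaA rest2 (L ++ [String.ofList [s, t]])
    else ClausulaA rest (L ++ [String.ofList [s]])

-- the while-loop of formaClausal over (A, count, L); A[:count] / A[count+1:]
-- are List.take / List.drop (exact: 0 ≤ count); none propagates an IndexError
def fcA (A : List Char) (count : Nat) (L : List (List String)) :
    Option (List (List String)) :=
  if hA : A = [] then some L
  else if hc : A.length ≤ count then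
    match ClausulaA A [] with
    | none => none
    | some c => fcA [] count (L ++ [c])              -- Python sets A = []
  else
    if A[count]'(by omega) = 'Y' then
      match ClausulaA (A.take count) [] with
      | none => none
      | some c => fcA (A.drop (count + 1)) 0 (L ++ [c])
    else fcA A (count + 1) L
termination_by (A.length, A.length - count)
decreasing_by
  · have h0 : 0 < A.length := List.length_pos_of_ne_nil hA
    simp only [List.length_nil]
    exact Prod.Lex.left _ _ (by omega)
  · have h0 : 0 < A.length := List.length_pos_of_ne_nil hA
    exact Prod.Lex.left _ _ (by simp only [List.length_drop]; omega)
  · exact Prod.Lex.right _ (by omega)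

-- the `.getD []` is never reached under Pre_formaClausal (A raises there)
def formaClausal (A : String) : List (List String) :=
  (fcA A.toList 0 []).getD []

-- ===== PORT B =====
-- one step of Source B's for-loop; state = (clauses, cur, empty, pending)
def stepB (st : List (List String) × List String × Bool × Bool) (c : Char) :
    List (List String) × List String × Bool × Bool :=
  match st with
  | (clauses, cur, _empty, pending) =>
    if c = 'Y' then (clauses ++ [cur], [], true, false)
    else if pending then (clauses, cur ++ [String.ofList ['-', c]], false, false)
    else if c = '-' then (clauses, cur, false, true)
    else if c ≠ 'O' then (clauses, cur ++ [String.ofList [c]], false, false)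
    else (clauses, cur, false, false)

def formaClausal_alt (A : String) : List (List String) :=
  let st := A.toList.foldl stepB ([], [], true, false)
  if st.2.2.1 = false then st.1 ++ [st.2.1] else st.1

-- ===== PRECONDITION & SPEC =====
-- Pre_ excludes exactly the inputs on which Python A raises IndexError
-- (Clausula reads C[1] past the end): those strings in which some maximal
-- 'Y'-free segment ends in an ODD run of '-'.
def Pre_formaClausal (A : String) : Prop :=
  ∀ seg ∈ A.toList.splitOn 'Y',
    (seg.reverse.takeWhile (fun c => c == '-')).length % 2 = 0

instance (A : String) : Decidable (Pre_formaClausal A) := by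
  unfold Pre_formaClausal; infer_instance

def pvWitness_formaClausal : String := "a-bYc"

def Spec_formaClausal (A : String) (out : List (List String)) : Prop :=
  out = formaClausal_alt A
instance (A : String) (out : List (List String)) : Decidable (Spec_formaClausal A out) := by
  unfold Spec_formaClausal; infer_instance

-- ===== CLAIM (what is proved, stated in full; the proofs are below) =====
def Claim_equal_formaClausal : Prop :=
  ∀ (A : String), Dom_formaClausal A → Pre_formaClausal A →
    Spec_formaClausal A (formaClausal A)

-- ===== LEMMAS AND PROOFS =====

-- the token list of one 'Y'-free segment (what Clausula returns)
def tok : List Char → List String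
  | [] => []
  | ['-'] => []
  | '-' :: c :: r => String.ofList ['-', c] :: tok r
  | c :: r => if c = 'O' then tok r else String.ofList [c] :: tok r

-- whether tokenizing a segment completes (false = A's IndexError)
def okT : List Char → Bool
  | [] => true
  | ['-'] => false
  | '-' :: _ :: r => okT r
  | _ :: r => okT r

theorem clausulaA_eq (C : List Char) (L : List String) :
    ClausulaA C L = if okT C then some (L ++ tok C) else none := by
  induction C using tok.induct generalizing L with
  | case1 => simp only [ClausulaA, okT, if_pos rfl]; simp [tok]
  | case2 => simp [ClausulaA, tok, okT]
  | case3 c r ih =>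
    have e1 : ClausulaA ('-' :: c :: r) L
        = ClausulaA r (L ++ [String.ofList ['-', c]]) := by
      rfl
    have e2 : tok ('-' :: c :: r) = String.ofList ['-', c] :: tok r := by
      rfl
    have e3 : okT ('-' :: c :: r) = okT r := by rfl
    rw [e1, e2, e3, ih]
    split <;> simp
  | case4 r h1 h2 ih =>
    have e1 : ClausulaA ('O' :: r) L = ClausulaA r L := by
      rw [ClausulaA.eq_def]; simp
    have e2 : tok ('O' :: r) = tok r := by
      cases r with
      | nil => rfl
      | cons t r2 => rfl
    have e3 : okT ('O' :: r) = okT r := by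
      cases r with
      | nil => rfl
      | cons t r2 => rfl
    rw [e1, e2, e3, ih]
  | case5 c r h1 h2 hO ih =>
    have hc : c ≠ '-' := by
      intro h; subst h
      cases r with
      | nil => exact h1 rfl rfl
      | cons t r2 => exact h2 t r2 rfl rfl
    have e1 : ClausulaA (c :: r) L = ClausulaA r (L ++ [String.ofList [c]]) := by
      rw [ClausulaA.eq_def]; simp [hO, hc]
    have e2 : tok (c :: r) = String.ofList [c] :: tok r := by
      cases r with
      | nil => simp only [tok]; rw [if_neg hO]
      | cons t r2 =>
        conv_lhs => rw [tok.eq_def]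
        simp [hO]
    have e3 : okT (c :: r) = okT r := by
      cases r with
      | nil => conv_lhs => rw [okT.eq_def]; simp [hc]
      | cons t r2 => conv_lhs => rw [okT.eq_def]; simp [hc]
    rw [e1, e2, e3, ih]
    split <;> simp

-- trailing '-'-run length of a segment
def trailRun (seg : List Char) : Nat :=
  (seg.reverse.takeWhile (fun c => c == '-')).length

theorem takeWhile_append_singleton (p : Char → Bool) (xs : List Char) (c : Char) :
    ((xs ++ [c]).takeWhile p).length =
      if xs.all p then xs.length + (if p c then 1 else 0)
      else (xs.takeWhile p).length := by
  induction xs with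
  | nil => by_cases h : p c <;> simp [List.takeWhile, h]
  | cons x xs ih =>
    by_cases hx : p x
    · rw [List.cons_append, List.takeWhile_cons_of_pos hx,
        List.takeWhile_cons_of_pos hx]
      simp only [List.length_cons, ih, List.all_cons, hx, Bool.true_and]
      split <;> omega
    · rw [List.cons_append, List.takeWhile_cons_of_neg hx,
        List.takeWhile_cons_of_neg hx]
      simp [List.all_cons, hx]

theorem trailRun_cons (c : Char) (r : List Char) :
    trailRun (c :: r) =
      if (c == '-') && r.all (fun x => x == '-') then r.length + 1
      else trailRun r := by
  unfold trailRun
  rw [List.reverse_cons, takeWhile_append_singleton]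
  rw [List.all_reverse]
  by_cases hr : r.all (fun x => x == '-')
  · by_cases hc : (c == '-')
    · simp [hr, hc]
    · have hrev : r.reverse.takeWhile (fun c => c == '-') = r.reverse := by
        rw [List.takeWhile_eq_self_iff]
        intro x hx
        exact (List.all_eq_true.mp hr) x (List.mem_reverse.mp hx)
      simp [hr, hc, hrev]
  · simp [hr]

theorem trailRun_all (r : List Char) (h : r.all (fun x => x == '-')) :
    trailRun r = r.length := by
  unfold trailRun
  have : r.reverse.takeWhile (fun c => c == '-') = r.reverse := by
    rw [List.takeWhile_eq_self_iff]
    intro x hx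
    exact (List.all_eq_true.mp h) x (List.mem_reverse.mp hx)
  simp [this]

theorem okT_cons_ne (c : Char) (r : List Char) (hc : c ≠ '-') :
    okT (c :: r) = okT r := by
  cases r with
  | nil => rw [okT.eq_def]; simp [hc]
  | cons t r2 => rw [okT.eq_def]; simp [hc]

theorem okT_false_odd (C : List Char) (h : okT C = false) :
    trailRun C % 2 = 1 := by
  induction C using okT.induct with
  | case1 => simp [okT] at h
  | case2 => simp [trailRun, List.takeWhile]
  | case3 c r ih =>
    have hr' : okT ('-' :: c :: r) = okT r := by rw [okT]
    have hr := ih (by rw [← hr']; exact h)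
    by_cases ha : ((c == '-') && r.all (fun x => x == '-')) = true
    · have hrall : r.all (fun x => x == '-') := by
        simp only [Bool.and_eq_true] at ha; exact ha.2
      have hall : ((c :: r).all (fun x => x == '-')) = true := by
        simp only [List.all_cons]; exact ha
      rw [trailRun_cons '-' (c :: r)]
      simp only [beq_self_eq_true, Bool.true_and, hall, List.length_cons]
      have hlen := trailRun_all r hrall
      rw [hlen] at hr
      simp only [if_pos trivial]
      omega
    · have hna : ((c :: r).all (fun x => x == '-')) = false := by
        simp only [List.all_cons]; simpa using ha
      rw [trailRun_cons '-' (c :: r)]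
      simp only [beq_self_eq_true, Bool.true_and, hna, Bool.false_eq_true,
        if_false]
      rw [trailRun_cons c r, if_neg (by simp [ha])]
      exact hr
  | case4 c r h1 h2 ih =>
    have hc : c ≠ '-' := by
      intro hh; subst hh
      cases r with
      | nil => exact h1 rfl rfl
      | cons t r2 => exact h2 t r2 rfl rfl
    have hr := ih (by rw [← okT_cons_ne c r hc]; exact h)
    rw [trailRun_cons c r, if_neg (by simp [hc])]
    exact hr

-- spec value: the clause list, by first-'Y' decomposition
def S (A : List Char) : List (List String) :=
  if h : 'Y' ∈ A then
    tok (A.take (A.idxOf 'Y')) :: S (A.drop (A.idxOf 'Y' + 1))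
  else if A = [] then [] else [tok A]
termination_by A.length
decreasing_by
  have := List.idxOf_lt_length_of_mem h
  simp [List.length_drop]; omega

-- every segment tokenizes without the IndexError
def okS (A : List Char) : Bool :=
  if h : 'Y' ∈ A then
    okT (A.take (A.idxOf 'Y')) && okS (A.drop (A.idxOf 'Y' + 1))
  else okT A
termination_by A.length
decreasing_by
  have := List.idxOf_lt_length_of_mem h
  simp [List.length_drop]; omega

theorem not_mem_take_idxOf (A : List Char) : 'Y' ∉ A.take (A.idxOf 'Y') := by
  intro hmem
  obtain ⟨j, hj, hY⟩ := List.getElem_of_mem hmem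
  have hjlt : j < A.idxOf 'Y' := by
    have := hj; simp [List.length_take] at this; omega
  have hget : (A.take (A.idxOf 'Y'))[j] = A[j]'(by
      have hlt := hj
      simp [List.length_take] at hlt
      omega) := List.getElem_take ..
  have := List.not_of_lt_findIdx (p := fun x => x == 'Y') (xs := A)
    (i := j) hjlt
  rw [hget] at hY
  exact absurd hY (by simpa using this)

theorem splitOn_append (pre post : List Char) (h : 'Y' ∉ pre) :
    (pre ++ 'Y' :: post).splitOn 'Y' = pre :: post.splitOn 'Y' := by
  induction pre with
  | nil => simp [List.splitOn, List.splitOnP_cons]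
  | cons c pre ih =>
    have hc : ¬ (c == 'Y') = true := by
      simp only [beq_iff_eq]; intro hh; exact h (hh ▸ List.mem_cons_self ..)
    have ih' := ih (fun hm => h (List.mem_cons_of_mem _ hm))
    simp only [List.splitOn] at *
    rw [List.cons_append, List.splitOnP_cons, if_neg (by simpa using hc), ih']
    rfl

theorem splitOn_no (A : List Char) (h : 'Y' ∉ A) : A.splitOn 'Y' = [A] := by
  induction A with
  | nil => rfl
  | cons c A ih =>
    have hc : ¬ (c == 'Y') = true := by
      simp only [beq_iff_eq]; intro hh; exact h (hh ▸ List.mem_cons_self ..)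
    have ih' := ih (fun hm => h (List.mem_cons_of_mem _ hm))
    simp only [List.splitOn] at *
    rw [List.splitOnP_cons, if_neg (by simpa using hc), ih']
    rfl

theorem decomp_of_mem (A : List Char) (h : 'Y' ∈ A) :
    A = A.take (A.idxOf 'Y') ++ 'Y' :: A.drop (A.idxOf 'Y' + 1) := by
  have hlt := List.idxOf_lt_length_of_mem h
  conv_lhs => rw [← List.take_append_drop (A.idxOf 'Y') A]
  rw [List.drop_eq_getElem_cons hlt, List.getElem_idxOf]

theorem pre_to_okS (A : List Char)
    (h : ∀ seg ∈ A.splitOn 'Y', trailRun seg % 2 = 0) : okS A = true := by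
  by_cases hY : 'Y' ∈ A
  · rw [okS, dif_pos hY]
    have hd := decomp_of_mem A hY
    have hsp : A.splitOn 'Y'
        = A.take (A.idxOf 'Y') :: (A.drop (A.idxOf 'Y' + 1)).splitOn 'Y' := by
      conv_lhs => rw [hd]
      exact splitOn_append _ _ (not_mem_take_idxOf A)
    have hhead : trailRun (A.take (A.idxOf 'Y')) % 2 = 0 := by
      apply h; rw [hsp]; exact List.mem_cons_self ..
    have htail := pre_to_okS (A.drop (A.idxOf 'Y' + 1))
      (fun seg hs => h seg (by rw [hsp]; exact List.mem_cons_of_mem _ hs))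
    have hok : okT (A.take (A.idxOf 'Y')) = true := by
      by_contra hh
      have := okT_false_odd _ (Bool.eq_false_iff.mpr hh)
      omega
    simp [hok, htail]
  · rw [okS, dif_neg hY]
    have := h A (by rw [splitOn_no A hY]; exact List.mem_cons_self ..)
    by_contra hh
    have := okT_false_odd A (Bool.eq_false_iff.mpr hh)
    omega
termination_by A.length
decreasing_by
  have := List.idxOf_lt_length_of_mem hY
  simp [List.length_drop]; omega

-- ===== A-side characterization =====

theorem fcA_eq (A : List Char) (cnt : Nat) (L : List (List String))
    (hcnt : cnt ≤ A.length) (hno : ∀ j, j < cnt → A[j]? ≠ some 'Y')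
    (hok : okS A = true) : fcA A cnt L = some (L ++ S A) := by
  by_cases hA : A = []
  · subst hA
    rw [fcA]
    rw [S]; simp
  · by_cases hc : A.length ≤ cnt
    · -- count reached the end of A: there is no 'Y' anywhere in A
      have hcnt' : cnt = A.length := le_antisymm hcnt hc
      have hnoY : 'Y' ∉ A := by
        intro hm
        obtain ⟨j, hj, hY⟩ := List.getElem_of_mem hm
        exact hno j (by omega) (by rw [List.getElem?_eq_getElem hj, hY])
      have hokT : okT A = true := by rw [okS, dif_neg hnoY] at hok; exact hok
      rw [fcA]; simp only [dif_neg hA, dif_pos hc]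
      rw [clausulaA_eq, if_pos hokT]
      simp only [List.nil_append]
      rw [fcA]
      have hS : S A = [tok A] := by
        rw [S]; simp [hnoY, hA]
      rw [hS]
      simp
    · have hlt : cnt < A.length := by omega
      by_cases hY : A[cnt]'hlt = 'Y'
      · -- found the first 'Y': it is at index cnt
        have hidx : A.idxOf 'Y' = cnt := by
          unfold List.idxOf
          rw [List.findIdx_eq hlt]
          constructor
          · simp [hY]
          · intro j hj
            have := hno j hj
            rw [List.getElem?_eq_getElem (by omega)] at this
            simpa using this
        have hmem : 'Y' ∈ A := by
          rw [← hY]; exact List.getElem_mem _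
        have hokS := hok
        rw [okS, dif_pos hmem, hidx, Bool.and_eq_true] at hokS
        rw [fcA]; simp only [dif_neg hA, dif_neg (by omega : ¬ A.length ≤ cnt)]
        rw [if_pos hY, clausulaA_eq, if_pos hokS.1]
        simp only [List.nil_append]
        rw [fcA_eq (A.drop (cnt + 1)) 0 (L ++ [tok (A.take cnt)])
          (by omega) (by intro j hj; omega) hokS.2]
        have hS : S A = tok (A.take cnt) :: S (A.drop (cnt + 1)) := by
          rw [S, dif_pos hmem, hidx]
        rw [hS]
        simp
      · -- advance count
        rw [fcA]; simp only [dif_neg hA, dif_neg (by omega : ¬ A.length ≤ cnt)]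
        rw [if_neg hY]
        exact fcA_eq A (cnt + 1) L (by omega)
          (by
            intro j hj
            by_cases hjc : j < cnt
            · exact hno j hjc
            · have hj' : j = cnt := by omega
              subst hj'
              rw [List.getElem?_eq_getElem hlt]
              simpa using hY)
          hok
termination_by (A.length, A.length - cnt)
decreasing_by
  · have h0 : 0 < A.length := List.length_pos_of_ne_nil hA
    exact Prod.Lex.left _ _ (by simp only [List.length_drop]; omega)
  · exact Prod.Lex.right _ (by omega)

-- ===== B-side characterization =====

theorem foldB_noY (seg : List Char) (h : 'Y' ∉ seg) (hok : okT seg = true) :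
    ∀ (cl : List (List String)) (cur : List String) (e : Bool),
      seg.foldl stepB (cl, cur, e, false)
        = (cl, cur ++ tok seg, e && seg.isEmpty, false) := by
  induction seg using tok.induct with
  | case1 => intro cl cur e; simp [tok]
  | case2 => simp [okT] at hok
  | case3 c r ih =>
    intro cl cur e
    have hcY : c ≠ 'Y' := fun hh => h (by simp [hh])
    have hr : 'Y' ∉ r := fun hm => h (by simp [hm])
    have hok' : okT r = true := by
      have e3 : okT ('-' :: c :: r) = okT r := by rfl
      rw [e3] at hok; exact hok
    simp only [List.foldl_cons]
    rw [show stepB (cl, cur, e, false) '-'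
        = (cl, cur, false, true) by simp [stepB]]
    rw [show stepB (cl, cur, false, true) c
        = (cl, cur ++ [String.ofList ['-', c]], false, false) by
      simp [stepB, hcY]]
    rw [ih hr hok' cl (cur ++ [String.ofList ['-', c]]) false]
    simp [tok]
  | case4 r h1 h2 ih =>
    intro cl cur e
    have hr : 'Y' ∉ r := fun hm => h (by simp [hm])
    have hok' : okT r = true := by
      rw [← okT_cons_ne 'O' r (by decide)]; exact hok
    simp only [List.foldl_cons]
    rw [show stepB (cl, cur, e, false) 'O' = (cl, cur, false, false) by
      simp [stepB]]
    rw [ih hr hok' cl cur false]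
    have htok : tok ('O' :: r) = tok r := by
      cases r with
      | nil => rfl
      | cons t r2 => rfl
    simp [htok]
  | case5 c r h1 h2 hO ih =>
    intro cl cur e
    have hcY : c ≠ 'Y' := fun hh => h (by simp [hh])
    have hcD : c ≠ '-' := by
      intro hh; subst hh
      cases r with
      | nil => exact h1 rfl rfl
      | cons t r2 => exact h2 t r2 rfl rfl
    have hr : 'Y' ∉ r := fun hm => h (by simp [hm])
    have hok' : okT r = true := by
      rw [← okT_cons_ne c r hcD]; exact hok
    have htok : tok (c :: r) = String.ofList [c] :: tok r := by
      cases r with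
      | nil => simp only [tok]; rw [if_neg hO]
      | cons t r2 => rw [tok.eq_def]; simp [hO]
    simp only [List.foldl_cons]
    rw [show stepB (cl, cur, e, false) c
        = (cl, cur ++ [String.ofList [c]], false, false) by
      simp [stepB, hcY, hcD, hO]]
    rw [ih hr hok' cl (cur ++ [String.ofList [c]]) false]
    simp [htok]

def finishB (st : List (List String) × List String × Bool × Bool) :
    List (List String) :=
  if st.2.2.1 = false then st.1 ++ [st.2.1] else st.1

theorem foldB_S (A : List Char) (hok : okS A = true) :
    ∀ (cl : List (List String)),
      finishB (A.foldl stepB (cl, [], true, false)) = cl ++ S A := by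
  intro cl
  by_cases hY : 'Y' ∈ A
  · have hd := decomp_of_mem A hY
    have hokS := hok
    rw [okS, dif_pos hY, Bool.and_eq_true] at hokS
    conv_lhs => rw [hd]
    rw [List.foldl_append, List.foldl_cons]
    rw [foldB_noY _ (not_mem_take_idxOf A) hokS.1]
    rw [show stepB (cl, [] ++ tok (A.take (A.idxOf 'Y')),
          true && (A.take (A.idxOf 'Y')).isEmpty, false) 'Y'
        = (cl ++ [[] ++ tok (A.take (A.idxOf 'Y'))], [], true, false) by
      simp [stepB]]
    rw [foldB_S (A.drop (A.idxOf 'Y' + 1)) hokS.2]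
    have hS : S A = tok (A.take (A.idxOf 'Y')) :: S (A.drop (A.idxOf 'Y' + 1)) := by
      rw [S, dif_pos hY]
    rw [hS]
    simp
  · rw [foldB_noY A hY (by rwa [okS, dif_neg hY] at hok)]
    rw [S, dif_neg hY]
    by_cases hA : A = []
    · subst hA; simp [finishB]
    · have : A.isEmpty = false := by simpa [List.isEmpty_iff] using hA
      simp [finishB, this, if_neg hA]
termination_by A.length
decreasing_by
  have := List.idxOf_lt_length_of_mem hY
  simp [List.length_drop]; omega

theorem alt_eq_finish (A : String) :
    formaClausal_alt A = finishB (A.toList.foldl stepB ([], [], true, false)) := rfl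

-- ===== VERDICT (by name: the statement is the Claim_ definition above) =====
theorem formaClausal_spec : Claim_equal_formaClausal := by
  intro A _hdom hpre
  unfold Spec_formaClausal
  have hok : okS A.toList = true :=
    pre_to_okS A.toList (fun seg hs => hpre seg hs)
  have ha := fcA_eq A.toList 0 [] (by omega) (by omega) hok
  have hb := foldB_S A.toList hok []
  rw [formaClausal, ha]
  rw [alt_eq_finish, hb]
  simp
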